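-- pv_equiv track=rewrite | github.com/trgnam04/MHH_Assignment_HK232 | Assignment-CO2011-CSE233-2212153-ProgramFolder/FFD.py | count_pattern_usage
-- ===== SOURCE A (Python) =====
-- def count_pattern_usage(patterns, cut_list):
--     pattern_count = {i: 0 for i in range(len(patterns))}
--
--     for cut in cut_list:
--         for i, pattern in enumerate(patterns):
--             if cut == pattern:
--                 pattern_count[i] += 1
--
--     pattern_usage_list = [pattern_count[i] for i in range(len(patterns))]
--
--     return pattern_usage_list
-- ===== SOURCE B (Python) =====
-- def count_pattern_usage(patterns, cut_list):
--     freq = {}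
--     for cut in cut_list:
--         key = tuple(cut)
--         freq[key] = freq.get(key, 0) + 1
--     return [freq.get(tuple(p), 0) for p in patterns]
-- ===== Notes on version B (the rewrite author's own statement) =====
-- stated objective: faster
-- what changed: Replaces the nested cut-by-pattern scan with a one-pass frequency dict over the (tuplified) cuts followed by a single lookup per pattern.
import Mathlib
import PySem

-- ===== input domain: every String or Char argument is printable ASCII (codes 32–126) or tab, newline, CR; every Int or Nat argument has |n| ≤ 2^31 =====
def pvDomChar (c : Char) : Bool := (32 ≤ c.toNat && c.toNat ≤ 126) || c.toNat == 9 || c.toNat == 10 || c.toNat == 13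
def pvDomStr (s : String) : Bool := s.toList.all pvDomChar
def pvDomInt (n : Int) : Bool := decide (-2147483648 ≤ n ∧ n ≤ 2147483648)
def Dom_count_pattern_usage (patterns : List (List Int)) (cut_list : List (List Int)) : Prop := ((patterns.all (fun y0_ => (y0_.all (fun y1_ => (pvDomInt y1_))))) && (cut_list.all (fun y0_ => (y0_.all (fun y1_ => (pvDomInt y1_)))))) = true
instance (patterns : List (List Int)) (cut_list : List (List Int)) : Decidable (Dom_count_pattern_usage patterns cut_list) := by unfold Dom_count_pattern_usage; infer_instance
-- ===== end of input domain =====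

-- B replaces A's nested cut×pattern scan by a one-pass frequency dict over the cuts plus one lookup per pattern.

-- ===== PORT A =====
-- pattern_count[i] += 1 is ported as Dict.modify i 0 (·+1) and the final pattern_count[i]
-- as getD i 0: the key i is always present (inserted by the initial comprehension), so both are exact.
def count_pattern_usage (patterns : List (List Int)) (cut_list : List (List Int)) : List Int :=
  let pc0 : PySem.Dict Int Int :=
    (PySem.List.pyRange 0 patterns.length 1).foldl (fun d i => d.insert i 0) PySem.Dict.empty
  let pc : PySem.Dict Int Int :=
    cut_list.foldl (fun d cut =>
      (PySem.List.enumerate patterns).foldl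
        (fun d ip => if cut == ip.2 then d.modify ip.1 0 (· + 1) else d) d) pc0
  (PySem.List.pyRange 0 patterns.length 1).map (fun i => pc.getD i 0)

-- ===== PORT B =====
def count_pattern_usage_alt (patterns : List (List Int)) (cut_list : List (List Int)) : List Int :=
  let freq : PySem.Dict (List Int) Int :=
    cut_list.foldl (fun d cut => d.insert cut (d.getD cut 0 + 1)) PySem.Dict.empty
  patterns.map (fun p => freq.getD p 0)

-- ===== PRECONDITION & SPEC =====
def Spec_count_pattern_usage (patterns : List (List Int)) (cut_list : List (List Int)) (out : List Int) : Prop := out = count_pattern_usage_alt patterns cut_list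
instance (patterns : List (List Int)) (cut_list : List (List Int)) (out : List Int) : Decidable (Spec_count_pattern_usage patterns cut_list out) := by unfold Spec_count_pattern_usage; infer_instance

-- ===== CLAIM (what is proved, stated in full; the proofs are below) =====
def Claim_equal_count_pattern_usage : Prop := ∀ (patterns : List (List Int)) (cut_list : List (List Int)), Dom_count_pattern_usage patterns cut_list → Spec_count_pattern_usage patterns cut_list (count_pattern_usage patterns cut_list)

-- ===== LEMMAS AND PROOFS =====

-- the initial comprehension {i: 0} never changes any lookup-with-default-0
theorem pv_init_getD (l : List Int) (d : PySem.Dict Int Int)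
    (h : ∀ k, d.getD k 0 = 0) (j : Int) :
    (l.foldl (fun d i => d.insert i (0 : Int)) d).getD j 0 = 0 := by
  induction l generalizing d with
  | nil => exact h j
  | cons a l ih =>
      simp only [List.foldl_cons]
      exact ih _ (fun k => by rw [PySem.Dict.getD_insert]; split <;> simp [h])

-- A's inner loop over enumerate: increments key i exactly when i is in range and cut equals patterns[i]
theorem pv_enum_fold (cut : List Int) (patterns : List (List Int)) (s : Int)
    (d : PySem.Dict Int Int) (i : Int) :
    ((PySem.List.enumerate patterns s).foldl
        (fun d ip => if cut == ip.2 then d.modify ip.1 0 (· + 1) else d) d).getD i 0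
      = d.getD i 0 +
        (if s ≤ i ∧ patterns[(i - s).toNat]? = some cut then 1 else 0) := by
  induction patterns generalizing s d with
  | nil => simp [PySem.List.enumerate_nil]
  | cons p ps ih =>
      have hd' : (if cut == p then d.modify s 0 (· + 1) else d).getD i 0
          = d.getD i 0 + (if i = s ∧ cut = p then 1 else 0) := by
        by_cases hc : cut = p
        · simp only [hc, beq_self_eq_true, if_true]
          rw [PySem.Dict.getD_modify]
          split_ifs with h1 h2 h2 <;> simp_all
        · rw [if_neg (by simpa using hc)]
          rw [if_neg (by intro h; exact hc h.2)]
          ring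
      rw [PySem.List.enumerate_cons, List.foldl_cons, ih, hd']
      by_cases hi : i = s
      · subst hi
        have h0 : (i - i).toNat = 0 := by omega
        rw [h0, List.getElem?_cons_zero]
        have hB : (if i + 1 ≤ i ∧ ps[(i - (i + 1)).toNat]? = some cut then (1:Int) else 0) = 0 :=
          if_neg (fun h => absurd h.1 (by omega))
        rw [hB]
        by_cases hc : cut = p
        · simp [hc]
        · simp [hc, eq_comm]
      · have hA : (if i = s ∧ cut = p then (1:Int) else 0) = 0 :=
          if_neg (fun h => hi h.1)
        rw [hA]
        by_cases hlt : s < i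
        · have hk : (i - s).toNat = (i - (s + 1)).toNat + 1 := by omega
          rw [hk, List.getElem?_cons_succ]
          have heq : (if s + 1 ≤ i ∧ ps[(i - (s + 1)).toNat]? = some cut then (1:Int) else 0)
              = (if s ≤ i ∧ ps[(i - (s + 1)).toNat]? = some cut then (1:Int) else 0) :=
            if_congr (and_congr_left' (by omega)) rfl rfl
          rw [heq]
          ring
        · have hB : (if s + 1 ≤ i ∧ ps[(i - (s + 1)).toNat]? = some cut then (1:Int) else 0) = 0 :=
            if_neg (fun h => absurd h.1 (by omega))
          have hC : (if s ≤ i ∧ (p :: ps)[(i - s).toNat]? = some cut then (1:Int) else 0) = 0 :=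
            if_neg (fun h => hi (by omega))
          rw [hB, hC]
          ring

-- A's outer loop: key i ends at (count of cuts equal to patterns[i]) for in-range i
theorem pv_outer_fold (patterns cut_list : List (List Int)) (d : PySem.Dict Int Int)
    (i : Int) (h0 : 0 ≤ i) (hlt : i.toNat < patterns.length) :
    (cut_list.foldl (fun d cut =>
        (PySem.List.enumerate patterns).foldl
          (fun d ip => if cut == ip.2 then d.modify ip.1 0 (· + 1) else d) d) d).getD i 0
      = d.getD i 0 + cut_list.count (patterns.getD i.toNat []) := by
  induction cut_list generalizing d with
  | nil => simp
  | cons c cs ih =>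
      rw [List.foldl_cons, ih]
      have he := pv_enum_fold c patterns 0 d i
      have hsub : (i - 0).toNat = i.toNat := by omega
      have hget : patterns[i.toNat]? = some (patterns.getD i.toNat []) := by
        rw [List.getElem?_eq_getElem hlt, List.getD_eq_getElem _ _ hlt]
      rw [hsub, hget] at he
      rw [he, List.count_cons]
      by_cases hc : c = patterns.getD i.toNat []
      · have hb : (c == patterns.getD i.toNat []) = true := by simp [hc]
        rw [hb, if_pos ⟨h0, by rw [hc]⟩]
        simp
        ring
      · have hb : (c == patterns.getD i.toNat []) = false := by rw [beq_eq_false_iff_ne]; exact hc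
        rw [hb, if_neg (fun h => hc (Option.some.inj h.2).symm)]
        simp

-- ===== VERDICT (by name: the statement is the Claim_ definition above) =====
theorem count_pattern_usage_spec : Claim_equal_count_pattern_usage := by
  intro patterns cut_list _
  unfold Spec_count_pattern_usage count_pattern_usage count_pattern_usage_alt
  simp only []
  rw [PySem.List.pyRange_one, List.map_map]
  apply List.ext_getElem
  · simp
  · intro k hk hk'
    simp only [List.getElem_map, List.getElem_range, Function.comp]
    have hk0 : k < patterns.length := by simpa using hk
    have ht : ((0:Int) + (k:Int)).toNat = k := by omega
    rw [pv_outer_fold patterns cut_list _ ((0:Int) + k) (by omega) (by rw [ht]; exact hk0)]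
    rw [pv_init_getD _ _ (fun j => PySem.Dict.getD_empty j 0)]
    rw [PySem.Dict.getD_foldl_insert_add_one, PySem.Dict.getD_empty]
    rw [ht, List.getD_eq_getElem _ _ hk0]
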